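-- pv_equiv track=rewrite | github.com/isaonaranjo/Proyecto3-DLP | proyecto3/analysis.py | compiler
-- ===== SOURCE A (Python) =====
-- def compiler(line, characters, i=0, data=''):
--     ''' datos iniciales para el compilador '''
--     # igualamos los contadores
--     temp = data
--     i += 1
--     data_value = [data]
--     while i < len(line):
--         temp += line[i]
--         if temp in characters:
--             data_value.append(temp)
--         i += 1
--     max_value = max(data_value, key = len)
--     # retornamos cada identificador de los diccionarios utilizados
--     return max_value
-- ===== SOURCE B (Python) =====
-- def compiler(line, characters, i=0, data=''):
--     ''' longest extension of `data` by consecutive characters of `line`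
--         (starting after position i) that appears in `characters` '''
--     full = data + ''.join(line[k] for k in range(i + 1, len(line)))
--     for j in range(len(full), len(data), -1):
--         cand = full[:j]
--         if cand in characters:
--             return cand
--     return data
-- ===== Notes on version B (the rewrite author's own statement) =====
-- stated objective: alternative
-- what changed: A builds every matching prefix ascending into an accumulator list and takes max(key=len); B scans candidate prefixes longest-first and returns the first one found in characters, with no accumulator and no max pass.
import Mathlib
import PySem

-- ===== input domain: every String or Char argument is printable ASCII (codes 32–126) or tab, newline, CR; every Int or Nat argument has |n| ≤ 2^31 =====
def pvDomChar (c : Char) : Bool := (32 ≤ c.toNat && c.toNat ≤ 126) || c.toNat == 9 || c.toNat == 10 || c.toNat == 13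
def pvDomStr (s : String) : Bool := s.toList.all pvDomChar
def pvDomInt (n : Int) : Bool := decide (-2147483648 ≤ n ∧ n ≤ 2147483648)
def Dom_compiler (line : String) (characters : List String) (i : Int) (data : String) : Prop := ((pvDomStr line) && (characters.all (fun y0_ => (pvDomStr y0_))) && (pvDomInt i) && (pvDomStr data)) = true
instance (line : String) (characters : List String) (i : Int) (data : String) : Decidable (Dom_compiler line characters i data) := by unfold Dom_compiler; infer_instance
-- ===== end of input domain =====

-- B replaces A's ascending accumulate-all-matches-then-max(key=len) loop by a longest-first
-- scan over candidate prefixes with an early return (objective: alternative decomposition).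

-- ===== PORT A =====
-- A's while loop: temp grows by one char per step; matching temps are appended to the accumulator
def compilerLoop (cs : List Char) (chs : List (List Char)) (i : Int) (temp : List Char)
    (acc : List (List Char)) : Nat → List (List Char)
  | 0 => acc
  | fuel + 1 =>
    if i < (cs.length : Int) then
      match PySem.List.pyGet? cs i with
      | none => acc   -- IndexError: excluded by Pre_compiler
      | some c =>
        compilerLoop cs chs (i + 1) (temp ++ [c])
          (if chs.contains (temp ++ [c]) then acc ++ [temp ++ [c]] else acc) fuel
    else acc

def compiler (line : String) (characters : List String) (i : Int) (data : String) : String :=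
  let cs := line.toList
  let chs := characters.map String.toList
  let i1 := i + 1
  let dv := compilerLoop cs chs i1 data.toList [data.toList] (((cs.length : Int) - i1).toNat)
  match PySem.List.max? dv (fun s => ((s.length : Int))) with
  | some m => String.ofList m
  | none => ""   -- unreachable: dv is nonempty

-- ===== PORT B =====
-- B's descending scan over prefixes of full = data ++ joined chars; the loop counter j
-- counts how many chars of `chars` the candidate full[:len(data)+j] still includes
def altScan (chs : List (List Char)) (data full : List Char) : Nat → String
  | 0 => String.ofList data
  | j + 1 =>
    let cand := full.take (data.length + (j + 1))
    if chs.contains cand then String.ofList cand else altScan chs data full j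

def compiler_alt (line : String) (characters : List String) (i : Int) (data : String) : String :=
  let cs := line.toList
  let chars := (PySem.List.pyRange (i + 1) (cs.length : Int) 1).map
      (fun k => (PySem.List.pyGet? cs k).getD ' ')   -- none = IndexError: excluded by Pre_compiler
  let full := data.toList ++ chars
  altScan (characters.map String.toList) data.toList full chars.length

-- ===== PRECONDITION & SPEC =====
-- A raises IndexError exactly when i+1 < -len(line) (the first wrapped index is out of range); B raises there too.
def Pre_compiler (line : String) (characters : List String) (i : Int) (data : String) : Prop :=
  -(line.toList.length : Int) ≤ i + 1
instance (line : String) (characters : List String) (i : Int) (data : String) : Decidable (Pre_compiler line characters i data) := by unfold Pre_compiler; infer_instance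

def pvWitness_compiler : String × List String × Int × String := ("abc", ["ab"], 0, "a")

def Spec_compiler (line : String) (characters : List String) (i : Int) (data : String) (out : String) : Prop := out = compiler_alt line characters i data
instance (line : String) (characters : List String) (i : Int) (data : String) (out : String) : Decidable (Spec_compiler line characters i data out) := by unfold Spec_compiler; infer_instance

-- ===== CLAIM (what is proved, stated in full; the proofs are below) =====
def Claim_equal_compiler : Prop := ∀ (line : String) (characters : List String) (i : Int) (data : String), Dom_compiler line characters i data → Pre_compiler line characters i data → Spec_compiler line characters i data (compiler line characters i data)

-- ===== LEMMAS AND PROOFS =====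

-- the list of temps A builds / the candidate prefixes B scans
def pvCands (d : List Char) : List Char → List (List Char)
  | [] => []
  | c :: rest => (d ++ [c]) :: pvCands (d ++ [c]) rest

-- the characters actually read from position a up to b (with Python's negative-index wrap)
def pvRead (cs : List Char) (a b : Int) : List Char :=
  (PySem.List.pyRange a b 1).map (fun k => (PySem.List.pyGet? cs k).getD ' ')

theorem pvCands_append (d l : List Char) (c : Char) :
    pvCands d (l ++ [c]) = pvCands d l ++ [d ++ l ++ [c]] := by
  induction l generalizing d with
  | nil => simp [pvCands]
  | cons x xs ih => simp [pvCands, ih]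

theorem mem_pvCands_length {x d : List Char} {l : List Char} (h : x ∈ pvCands d l) :
    d.length < x.length := by
  induction l generalizing d with
  | nil => simp [pvCands] at h
  | cons c rest ih =>
    simp only [pvCands, List.mem_cons] at h
    rcases h with h | h
    · subst h; simp
    · have := ih h; simp at this; omega

theorem pvCands_pairwise (d l : List Char) :
    (pvCands d l).Pairwise (fun a b => a.length < b.length) := by
  induction l generalizing d with
  | nil => simp [pvCands]
  | cons c rest ih =>
    refine List.Pairwise.cons ?_ (ih _)
    intro y hy
    have := mem_pvCands_length hy
    simp at this ⊢; omega

theorem loop_eq (cs : List Char) (chs : List (List Char)) :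
    ∀ (fuel : Nat) (i : Int) (temp : List Char) (acc : List (List Char)),
      fuel = ((cs.length : Int) - i).toNat → -(cs.length : Int) ≤ i →
      compilerLoop cs chs i temp acc fuel
        = acc ++ (pvCands temp (pvRead cs i cs.length)).filter (fun t => chs.contains t) := by
  intro fuel
  induction fuel with
  | zero =>
    intro i temp acc hf hp
    have hni : (cs.length : Int) ≤ i := by omega
    simp [compilerLoop, pvRead, PySem.List.pyRange_one_eq_nil hni, pvCands]
  | succ fuel ih =>
    intro i temp acc hf hp
    have hlt : i < (cs.length : Int) := by omega
    have hin : PySem.Raise.InRange cs.length i := by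
      constructor <;> omega
    obtain ⟨c, hc⟩ : ∃ c, PySem.List.pyGet? cs i = some c := by
      cases h : PySem.List.pyGet? cs i with
      | none => exact absurd ((PySem.List.pyGet?_eq_none_iff _ _).mp h) (by simpa using hin)
      | some c => exact ⟨c, rfl⟩
    have hread : pvRead cs i cs.length = c :: pvRead cs (i+1) cs.length := by
      unfold pvRead
      rw [PySem.List.pyRange_one_cons hlt]
      simp [hc]
    rw [hread]
    have hih := ih (i+1) (temp ++ [c])
      (if chs.contains (temp ++ [c]) then acc ++ [temp ++ [c]] else acc)
      (by omega) (by omega)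
    simp only [compilerLoop, if_pos hlt, hc]
    rw [hih]
    by_cases hm : (temp ++ [c]) ∈ chs <;>
      simp [pvCands, hm]

theorem altScan_eq (chs : List (List Char)) (d chars : List Char) :
    ∀ j, j ≤ chars.length →
      altScan chs d (d ++ chars) j
        = String.ofList (((pvCands d (chars.take j)).filter (fun t => chs.contains t)).getLastD d) := by
  intro j
  induction j with
  | zero => intro _; simp [altScan, pvCands]
  | succ j ih =>
    intro hj
    have hjl : j < chars.length := by omega
    have htake : chars.take (j+1) = chars.take j ++ [chars[j]] := by
      rw [List.take_add_one]
      simp [List.getElem?_eq_getElem hjl]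
    have hx : d ++ chars.take (j+1) = d ++ chars.take j ++ [chars[j]] := by
      rw [htake, List.append_assoc]
    have htk : (d ++ chars).take (d.length + (j+1)) = d ++ chars.take (j+1) :=
      by rw [List.take_append]; simp
    have hst : altScan chs d (d ++ chars) (j+1)
        = if chs.contains (d ++ chars.take (j+1)) = true
          then String.ofList (d ++ chars.take (j+1)) else altScan chs d (d ++ chars) j := by
      show (if chs.contains ((d ++ chars).take (d.length + (j+1))) = true
          then String.ofList ((d ++ chars).take (d.length + (j+1)))
          else altScan chs d (d ++ chars) j) = _
      rw [htk]
    by_cases hm : (d ++ chars.take j ++ [chars[j]]) ∈ chs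
    · have hm' : d ++ chars.take (j+1) ∈ chs := by rw [hx]; exact hm
      have hc : chs.contains (d ++ chars.take (j+1)) = true := by
        rw [hx]; simpa using hm
      rw [hst, hc, if_pos rfl, htake, pvCands_append]
      have hfilt : List.filter (fun t => chs.contains t)
            (pvCands d (chars.take j) ++ [d ++ chars.take j ++ [chars[j]]])
          = List.filter (fun t => chs.contains t) (pvCands d (chars.take j))
              ++ [d ++ chars.take j ++ [chars[j]]] := by
        rw [List.filter_append]; simp [hm']
      rw [hfilt, List.getLastD_concat, List.append_assoc]
    · have hm' : d ++ chars.take (j+1) ∉ chs := by rw [hx]; exact hm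
      have hc : chs.contains (d ++ chars.take (j+1)) = false := by
        rw [hx]; simpa using hm
      rw [hst, hc]
      have hfilt : List.filter (fun t => chs.contains t)
            (pvCands d (chars.take j) ++ [d ++ chars.take j ++ [chars[j]]])
          = List.filter (fun t => chs.contains t) (pvCands d (chars.take j)) := by
        rw [List.filter_append]; simp [hm']
      rw [if_neg (by simp), htake, pvCands_append, hfilt, ih (by omega)]

theorem max_last {xs : List (List Char)} (h : xs.Pairwise (fun a b => a.length < b.length))
    (hne : xs ≠ []) :
    PySem.List.max? xs (fun s => ((s.length : Int))) = some (xs.getLast hne) := by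
  cases hmx : PySem.List.max? xs (fun s => ((s.length : Int))) with
  | none => exact absurd ((PySem.List.max?_eq_none_iff _ _).mp hmx) hne
  | some m =>
    have hmem := PySem.List.max?_mem hmx
    have hmax := PySem.List.max?_isMax hmx
    have hdec : xs.dropLast ++ [xs.getLast hne] = xs := List.dropLast_append_getLast hne
    have hpw : ∀ y ∈ xs.dropLast, y.length < (xs.getLast hne).length := by
      intro y hy
      have := hdec ▸ h
      rw [List.pairwise_append] at this
      simpa using this.2.2 y hy
    have hmem' : m ∈ xs.dropLast ∨ m = xs.getLast hne := by
      rw [← hdec] at hmem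
      simpa using hmem
    rcases hmem' with hmem' | hmem'
    · exfalso
      have h1 := hpw m hmem'
      have h2 := hmax (xs.getLast hne) (List.getLast_mem hne)
      omega
    · rw [hmem']

theorem getLast_cons_eq_getLastD (a : List Char) (l : List (List Char)) :
    (a :: l).getLast (by simp) = l.getLastD a := by
  cases l with
  | nil => rfl
  | cons x xs => rw [List.getLast_cons (by simp), List.getLastD_cons, List.getLast_eq_getLastD]

-- ===== VERDICT (by name: the statement is the Claim_ definition above) =====
theorem compiler_spec : Claim_equal_compiler := by
  intro line characters i data _hdom hpre
  unfold Spec_compiler compiler compiler_alt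
  simp only []
  set cs := line.toList with hcs
  set chs := characters.map String.toList with hchs
  set d0 := data.toList with hd0
  have hpre' : -(cs.length : Int) ≤ i + 1 := hpre
  have hloop := loop_eq cs chs (((cs.length : Int) - (i+1)).toNat) (i+1) d0 [d0] rfl hpre'
  rw [hloop]
  set L := pvRead cs (i+1) cs.length with hL
  set F := (pvCands d0 L).filter (fun t => chs.contains t) with hF
  have hpw : (d0 :: F).Pairwise (fun a b => a.length < b.length) := by
    refine List.Pairwise.cons ?_ ((pvCands_pairwise d0 L).sublist List.filter_sublist)
    intro y hy
    exact mem_pvCands_length (List.mem_of_mem_filter hy)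
  have hmx := max_last hpw (by simp)
  have hchars : ((PySem.List.pyRange (i + 1) (cs.length : Int) 1).map
      (fun k => (PySem.List.pyGet? cs k).getD ' ')) = L := rfl
  rw [hchars]
  have hlen : L.length = L.length := rfl
  rw [altScan_eq chs d0 L L.length le_rfl, List.take_length]
  rw [show ([d0] ++ F : List (List Char)) = d0 :: F from rfl, hmx]
  rw [getLast_cons_eq_getLastD]
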